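-- pv_equiv track=rewrite | github.com/lewis-carson/cmhss | download_prices.py | get_start_market_index
-- ===== SOURCE A (Python) =====
-- def get_start_market_index(markets, downloaded_markets):
--     """Find the index to resume from based on the latest downloaded market"""
--     if not downloaded_markets:
--         return 0
--
--     market_list = list(markets.keys())
--
--     # Find the latest market that was downloaded
--     latest_downloaded = None
--     latest_index = -1
--
--     for market_id in downloaded_markets:
--         if market_id in market_list:
--             index = market_list.index(market_id)
--             if index > latest_index:
--                 latest_index = index
--                 latest_downloaded = market_id
--
--     if latest_downloaded is not None:
--         return latest_index + 1
--
--     return 0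
-- ===== SOURCE B (Python) =====
-- def get_start_market_index(markets, downloaded_markets):
--     """Find the index to resume from based on the latest downloaded market"""
--     downloaded = set(downloaded_markets)
--     best = -1
--     for i, market_id in enumerate(markets.keys()):
--         if market_id in downloaded:
--             best = i
--     return best + 1
-- ===== Notes on version B (the rewrite author's own statement) =====
-- stated objective: simpler
-- what changed: Instead of looping over downloaded_markets and calling list.index on each to track the maximum index, B builds a set of downloaded markets once and makes a single enumerate pass over the dict's keys, keeping the last (hence maximal) index whose key is in the set; the -1 initial value makes the no-match and empty-downloaded cases fall out of the same +1 return.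
import Mathlib
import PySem

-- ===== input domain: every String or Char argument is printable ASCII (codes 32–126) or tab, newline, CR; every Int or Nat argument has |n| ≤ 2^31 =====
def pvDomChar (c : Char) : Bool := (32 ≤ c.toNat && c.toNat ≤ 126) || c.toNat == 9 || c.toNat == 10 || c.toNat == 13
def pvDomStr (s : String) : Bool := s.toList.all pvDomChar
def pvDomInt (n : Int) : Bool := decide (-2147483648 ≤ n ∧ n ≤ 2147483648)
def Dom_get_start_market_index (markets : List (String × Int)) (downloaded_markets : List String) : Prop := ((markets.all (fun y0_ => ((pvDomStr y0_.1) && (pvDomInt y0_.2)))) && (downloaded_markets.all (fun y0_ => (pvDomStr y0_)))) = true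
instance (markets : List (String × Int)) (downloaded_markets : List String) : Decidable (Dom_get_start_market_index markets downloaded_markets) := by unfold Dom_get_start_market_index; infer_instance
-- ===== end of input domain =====

-- B replaces A's loop over downloaded_markets with repeated list.index calls by one
-- enumerate pass over the dict's keys against a set of downloaded markets (simpler).

-- ===== PORT A =====
-- A's loop body (the state is (latest_index, latest_downloaded)); used by the fold below.
def pvStepA2 (market_list : List String) (st : Int × Option String) (market_id : String) :
    Int × Option String :=
  if market_list.contains market_id then
    match PySem.List.index? market_list market_id with
    | some index => if (index : Int) > st.1 then ((index : Int), some market_id) else st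
    | none => st
  else st

def get_start_market_index (markets : List (String × Int)) (downloaded_markets : List String) : Int :=
  if downloaded_markets = [] then 0
  else
    let market_list := (PySem.Dict.ofList markets).keys
    let st := downloaded_markets.foldl (pvStepA2 market_list) (-1, none)
    match st.2 with
    | some _ => st.1 + 1
    | none => 0

-- ===== PORT B =====
-- hand-written structural port of Python's enumerate (exact: pairs each element with
-- its 0-based index); used instead of PySem.List.enumerate for fast kernel evaluation
def pvEnumerate (xs : List String) (i : Int) : List (Int × String) :=
  match xs with
  | [] => []
  | x :: rest => (i, x) :: pvEnumerate rest (i + 1)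

def get_start_market_index_alt (markets : List (String × Int)) (downloaded_markets : List String) : Int :=
  let downloaded : PySem.Set String := PySem.Set.ofList downloaded_markets
  let best := (pvEnumerate ((PySem.Dict.ofList markets).keys) 0).foldl
      (fun (best : Int) p => if PySem.Set.contains downloaded p.2 then p.1 else best) (-1)
  best + 1

-- ===== PRECONDITION & SPEC =====
def Spec_get_start_market_index (markets : List (String × Int)) (downloaded_markets : List String) (out : Int) : Prop := out = get_start_market_index_alt markets downloaded_markets
instance (markets : List (String × Int)) (downloaded_markets : List String) (out : Int) : Decidable (Spec_get_start_market_index markets downloaded_markets out) := by unfold Spec_get_start_market_index; infer_instance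

-- ===== CLAIM (what is proved, stated in full; the proofs are below) =====
def Claim_equal_get_start_market_index : Prop := ∀ (markets : List (String × Int)) (downloaded_markets : List String), Dom_get_start_market_index markets downloaded_markets → Spec_get_start_market_index markets downloaded_markets (get_start_market_index markets downloaded_markets)

-- ===== LEMMAS AND PROOFS =====

-- A's per-element step, on the Int component only (ks fixed = the key list).
def pvStepA (ks : List String) (a : Int) (d : String) : Int :=
  if ks.contains d then
    match PySem.List.index? ks d with
    | some index => if (index : Int) > a then (index : Int) else a
    | none => a
  else a

-- B's per-element step over the enumerated keys (dl fixed = downloaded list).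
def pvStepB (dl : List String) (a : Int) (p : Int × String) : Int :=
  if PySem.Set.contains (PySem.Set.ofList dl) p.2 then p.1 else a

lemma pvStepA2_fst (ks : List String) (st : Int × Option String) (d : String) :
    (pvStepA2 ks st d).1 = pvStepA ks st.1 d := by
  unfold pvStepA2 pvStepA
  by_cases hmm : d ∈ ks
  · rcases hidx : List.idxOf? d ks with _ | i
    · simp [hmm, hidx]
    · by_cases hgt : st.1 < (i : Int) <;> simp [hmm, hidx, hgt]
  · simp [hmm]

lemma pvStepA2_cases (ks : List String) (st : Int × Option String) (d : String) :
    pvStepA2 ks st d = st ∨ ∃ i : Int, pvStepA2 ks st d = (i, some d) := by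
  unfold pvStepA2
  by_cases hmm : d ∈ ks
  · rcases hidx : List.idxOf? d ks with _ | i
    · left; simp [hmm, hidx]
    · by_cases hgt : st.1 < (i : Int)
      · right; exact ⟨(i : Int), by simp [hmm, hidx, hgt]⟩
      · left; simp [hmm, hidx, hgt]
  · left; simp [hmm]

lemma pvStepB_eq (dl : List String) (a : Int) (p : Int × String) :
    pvStepB dl a p = if p.2 ∈ dl then p.1 else a := by
  simp [pvStepB, PySem.Set.mem_ofList]

-- idxOf? values are < ks.length
lemma pvIndex_lt (ks : List String) (d : String) (i : ℕ)
    (h : List.idxOf? d ks = some i) : i < ks.length := by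
  have h' : PySem.List.index? ks d = some i := by
    rw [PySem.List.index?_eq_idxOf?]; exact h
  obtain ⟨hk, -, -⟩ := PySem.List.getElem_of_index?_eq_some h'
  exact hk

-- the pvStepA fold is bounded by any c with ks.length ≤ c + 1 and start ≤ c
lemma pvFoldA_le (ks : List String) (dl : List String) (c : Int)
    (hc : (ks.length : Int) ≤ c + 1) :
    ∀ a : Int, a ≤ c → dl.foldl (pvStepA ks) a ≤ c := by
  induction dl with
  | nil => intro a ha; simpa using ha
  | cons d rest ih =>
      intro a ha
      refine ih _ ?_
      unfold pvStepA
      by_cases hmm : d ∈ ks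
      · rcases hidx : List.idxOf? d ks with _ | i
        · simpa [hmm, hidx] using ha
        · have hlt := pvIndex_lt ks d i hidx
          simp only [PySem.List.index?_eq_idxOf?, hidx, hmm, if_true]
          split_ifs <;> omega
      · simpa [hmm] using ha

-- pulling a dominating max through the pvStepA fold
lemma pvFoldA_max (ks : List String) (dl : List String) (c : Int)
    (hc : (ks.length : Int) ≤ c + 1) :
    ∀ a : Int, dl.foldl (pvStepA ks) (max a c) = max (dl.foldl (pvStepA ks) a) c := by
  induction dl with
  | nil => intro a; simp
  | cons d rest ih =>
      intro a
      have hstep : pvStepA ks (max a c) d = max (pvStepA ks a d) c := by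
        unfold pvStepA
        by_cases hmm : d ∈ ks
        · rcases hidx : List.idxOf? d ks with _ | i
          · simp [hmm, hidx]
          · have hlt := pvIndex_lt ks d i hidx
            simp only [PySem.List.index?_eq_idxOf?, hidx, hmm, if_true]
            split_ifs <;> omega
        · simp [hmm]
      simp only [List.foldl_cons, hstep, ih]

-- A's step over ks ++ [k] with k fresh
lemma pvStepA_append (ks : List String) (k : String) (hk : k ∉ ks) (a : Int) (d : String) :
    pvStepA (ks ++ [k]) a d =
      if d = k then max a (ks.length : Int) else pvStepA ks a d := by
  unfold pvStepA
  by_cases hdk : d = k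
  · subst hdk
    have h2 : List.idxOf? d (ks ++ [d]) = some ks.length := by
      have h := PySem.List.index?_append_singleton_self ks d hk
      rwa [PySem.List.index?_eq_idxOf?] at h
    simp [h2]
    split_ifs <;> omega
  · by_cases hm : d ∈ ks
    · have h2 : List.idxOf? d (ks ++ [k]) = List.idxOf? d ks := by
        have h := PySem.List.index?_append_of_mem (l := ks) [k] hm
        rw [PySem.List.index?_eq_idxOf?, PySem.List.index?_eq_idxOf?] at h
        exact h
      simp [h2, hm, hdk]
    · simp [hm, hdk]

-- folding A's step over dl, with a fresh key appended to ks
lemma pvFoldA_append (ks : List String) (k : String) (hk : k ∉ ks) (dl : List String) :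
    ∀ a : Int, dl.foldl (pvStepA (ks ++ [k])) a =
      if k ∈ dl then max (dl.foldl (pvStepA ks) a) (ks.length : Int)
      else dl.foldl (pvStepA ks) a := by
  induction dl with
  | nil => intro a; simp
  | cons d rest ih =>
      intro a
      simp only [List.foldl_cons]
      rw [ih (pvStepA (ks ++ [k]) a d), pvStepA_append ks k hk a d]
      by_cases hdk : d = k
      · have hga : pvStepA ks a d = a := by
          unfold pvStepA
          simp [show d ∉ ks from hdk ▸ hk]
        rw [if_pos hdk, hga, pvFoldA_max ks rest (ks.length : Int) (by omega) a]
        by_cases hr : k ∈ rest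
        · simp [hr, hdk, max_assoc, max_self]
        · simp [hr, hdk]
      · rw [if_neg hdk]
        simp [List.mem_cons, Ne.symm hdk]

lemma pvEnumerate_append (xs ys : List String) : ∀ s : Int,
    pvEnumerate (xs ++ ys) s = pvEnumerate xs s ++ pvEnumerate ys (s + xs.length) := by
  induction xs with
  | nil => intro s; simp [pvEnumerate]
  | cons x rest ih =>
      intro s
      simp only [List.cons_append, pvEnumerate, ih (s + 1), List.length_cons]
      congr 2
      push_cast
      ring

-- main: A's max-index fold over dl equals B's enumerate fold over the keys
lemma pvMain (ks : List String) : ks.Nodup → ∀ dl : List String,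
    dl.foldl (pvStepA ks) (-1) =
      (pvEnumerate ks 0).foldl (pvStepB dl) (-1) := by
  induction ks using List.reverseRecOn with
  | nil =>
      intro _ dl
      have h0 : ∀ a : Int, dl.foldl (pvStepA []) a = a := by
        induction dl with
        | nil => intro a; rfl
        | cons d rest ih =>
            intro a
            have h1 : pvStepA [] a d = a := by unfold pvStepA; rfl
            simp only [List.foldl_cons, h1, ih]
      simp [pvEnumerate, h0]
  | append_singleton ks k ih =>
      intro hnd dl
      rw [List.nodup_append] at hnd
      have hkn : k ∉ ks := fun hm => hnd.2.2 k hm k (List.mem_singleton_self k) rfl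
      rw [pvFoldA_append ks k hkn dl (-1), pvEnumerate_append ks [k] 0, List.foldl_append]
      simp only [pvEnumerate, List.foldl_cons, List.foldl_nil]
      rw [← ih hnd.1 dl, pvStepB_eq]
      have hbound := pvFoldA_le ks dl (ks.length : Int) (by omega) (-1) (by omega)
      by_cases hm : k ∈ dl
      · rw [if_pos hm, max_eq_right hbound]
        simp [hm]
      · rw [if_neg hm]
        simp [hm]

-- the Int component of A's paired fold is the pvStepA fold
lemma pvA_fold (ks : List String) : ∀ (dl : List String) (st : Int × Option String),
    (dl.foldl (pvStepA2 ks) st).1 = dl.foldl (pvStepA ks) st.1 := by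
  intro dl
  induction dl with
  | nil => intro st; rfl
  | cons d rest ih =>
      intro st
      simp only [List.foldl_cons]
      rw [ih (pvStepA2 ks st d), pvStepA2_fst]

-- once the Option component is some, it stays some
lemma pvA_some (ks : List String) : ∀ (dl : List String) (st : Int × Option String),
    st.2 ≠ none → (dl.foldl (pvStepA2 ks) st).2 ≠ none := by
  intro dl
  induction dl with
  | nil => intro st h; exact h
  | cons d rest ih =>
      intro st h
      simp only [List.foldl_cons]
      rcases pvStepA2_cases ks st d with hc | ⟨i, hc⟩
      · rw [hc]; exact ih st h
      · rw [hc]; exact ih (i, some d) (by simp)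

-- if the Option component ends none (from none), the Int component is unchanged
lemma pvA_none (ks : List String) : ∀ (dl : List String) (st : Int × Option String),
    st.2 = none → (dl.foldl (pvStepA2 ks) st).2 = none →
    (dl.foldl (pvStepA2 ks) st).1 = st.1 := by
  intro dl
  induction dl with
  | nil => intro st _ _; rfl
  | cons d rest ih =>
      intro st h1 h2
      simp only [List.foldl_cons] at h2 ⊢
      rcases pvStepA2_cases ks st d with hc | ⟨i, hc⟩
      · rw [hc] at h2 ⊢; exact ih st h1 h2
      · rw [hc] at h2
        exact absurd h2 (pvA_some ks rest (i, some d) (by simp))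

-- ===== VERDICT (by name: the statement is the Claim_ definition above) =====
theorem get_start_market_index_spec : Claim_equal_get_start_market_index := by
  intro markets dl _
  unfold Spec_get_start_market_index
  have hnd : ((PySem.Dict.ofList markets).keys).Nodup := PySem.Dict.nodup_keys_ofList markets
  have hB : get_start_market_index_alt markets dl =
      (pvEnumerate ((PySem.Dict.ofList markets).keys) 0).foldl (pvStepB dl) (-1) + 1 :=
    rfl
  rw [hB, ← pvMain ((PySem.Dict.ofList markets).keys) hnd dl]
  by_cases hnil : dl = []
  · subst hnil
    simp [get_start_market_index]
  · have hA : get_start_market_index markets dl =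
        (match (dl.foldl (pvStepA2 ((PySem.Dict.ofList markets).keys)) (-1, none)).2 with
          | some _ => (dl.foldl (pvStepA2 ((PySem.Dict.ofList markets).keys)) (-1, none)).1 + 1
          | none => (0 : Int)) := by
      unfold get_start_market_index
      rw [if_neg hnil]
    rw [hA]
    have hfold := pvA_fold ((PySem.Dict.ofList markets).keys) dl (-1, none)
    cases hsnd : (dl.foldl (pvStepA2 ((PySem.Dict.ofList markets).keys)) (-1, none)).2 with
    | none =>
        have h1 := pvA_none ((PySem.Dict.ofList markets).keys) dl (-1, none) rfl hsnd
        have h2 : dl.foldl (pvStepA ((PySem.Dict.ofList markets).keys)) (-1) = (-1 : Int) := by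
          simpa using hfold.symm.trans h1
        show (0 : Int) = dl.foldl (pvStepA ((PySem.Dict.ofList markets).keys)) (-1) + 1
        rw [h2]
        norm_num
    | some x =>
        show (dl.foldl (pvStepA2 ((PySem.Dict.ofList markets).keys)) (-1, none)).1 + 1 =
          dl.foldl (pvStepA ((PySem.Dict.ofList markets).keys)) (-1) + 1
        rw [hfold]
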